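-- pv_equiv track=rewrite | github.com/AlessioTaruffi/FondamentiDiProgrammazione | HW4req/program01.py | prosodia
-- ===== SOURCE A (Python) =====
-- def prosodia(es, finali):
--     prosodia = []
--     diz = {}
--     c = 0
--     for elemento in zip(es, finali):
--         if elemento in diz:
--             prosodia.append(diz[elemento])
--         elif elemento not in diz:
--             diz[elemento] = c
--             prosodia.append(c)
--             c += 1
--     return prosodia
-- ===== SOURCE B (Python) =====
-- def prosodia(es, finali):
--     pairs = list(zip(es, finali))
--     return [len(set(pairs[:pairs.index(p)])) for p in pairs]
-- ===== Notes on version B (the rewrite author's own statement) =====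
-- stated objective: alternative
-- what changed: B drops A's incremental dict/counter machinery entirely: the id of each pair is computed positionally as the number of distinct pairs strictly before its first occurrence, via pairs.index and len(set(prefix)).
import Mathlib
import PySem

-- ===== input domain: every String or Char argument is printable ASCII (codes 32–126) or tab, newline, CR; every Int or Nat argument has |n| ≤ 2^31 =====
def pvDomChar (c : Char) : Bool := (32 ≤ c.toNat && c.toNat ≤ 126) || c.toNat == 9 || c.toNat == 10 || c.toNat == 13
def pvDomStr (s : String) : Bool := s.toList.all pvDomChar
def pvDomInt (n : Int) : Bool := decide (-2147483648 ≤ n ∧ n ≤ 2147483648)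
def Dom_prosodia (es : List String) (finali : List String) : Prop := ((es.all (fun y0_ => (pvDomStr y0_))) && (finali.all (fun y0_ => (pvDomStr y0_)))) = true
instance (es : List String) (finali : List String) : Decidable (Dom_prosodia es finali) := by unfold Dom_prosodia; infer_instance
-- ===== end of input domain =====

-- B replaces A's incremental dict+counter scan by a positional computation:
-- each pair's id is len(set(pairs[:pairs.index(p)])), the number of distinct pairs
-- strictly before its first occurrence (alternative algorithm, no incremental state).


-- ===== PORT A =====
-- A's for-loop over zip(es, finali): state = (output so far, diz, c).
-- diz[elemento] is only read after 'elemento in diz' succeeded, so getD _ 0 is exact (the default is never used).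
def prosodiaLoop (ps : List (String × String)) (acc : List Int)
    (diz : PySem.Dict (String × String) Int) (c : Int) : List Int :=
  match ps with
  | [] => acc
  | p :: rest =>
    if diz.contains p then
      prosodiaLoop rest (acc ++ [diz.getD p 0]) diz c
    else
      prosodiaLoop rest (acc ++ [c]) (diz.insert p c) (c + 1)

def prosodia (es : List String) (finali : List String) : List Int :=
  prosodiaLoop (es.zip finali) [] PySem.Dict.empty 0

-- ===== PORT B =====
-- pairs.index(p): p is always drawn from pairs, so index? is some; the getD 0 default is never used.
def prosodia_alt (es : List String) (finali : List String) : List Int :=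
  let pairs := es.zip finali
  pairs.map (fun p =>
    ((PySem.Set.ofList
        (PySem.List.slice pairs none
          (some (((PySem.List.index? pairs p).getD 0 : Nat) : Int)))).length : Int))

-- ===== PRECONDITION & SPEC =====
def Spec_prosodia (es : List String) (finali : List String) (out : List Int) : Prop := out = prosodia_alt es finali
instance (es : List String) (finali : List String) (out : List Int) : Decidable (Spec_prosodia es finali out) := by unfold Spec_prosodia; infer_instance

-- ===== CLAIM (what is proved, stated in full; the proofs are below) =====
def Claim_equal_prosodia : Prop := ∀ (es : List String) (finali : List String), Dom_prosodia es finali → Spec_prosodia es finali (prosodia es finali)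

-- ===== LEMMAS AND PROOFS =====

-- A's dict-building step, abbreviated for the lemmas.
def pvStep (d : PySem.Dict (String × String) Int) (p : String × String) :
    PySem.Dict (String × String) Int :=
  if d.contains p then d else d.insert p (d.size : Int)

-- Keys of A's dict after scanning L from dict d: d.keys updated with L (as a set).
lemma pvKeys_foldl (L : List (String × String)) :
    ∀ d : PySem.Dict (String × String) Int,
      (L.foldl pvStep d).keys = PySem.Set.update d.keys L := by
  induction L with
  | nil => intro d; simp [PySem.Set.update]
  | cons q rest ih =>
    intro d
    simp only [List.foldl_cons, PySem.Set.update, List.foldl_cons]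
    rw [ih]
    have hkeys : (pvStep d q).keys = PySem.Set.add d.keys q := by
      by_cases hq : d.contains q = true
      · have : q ∈ d.keys := (PySem.Dict.contains_iff_mem_keys _ _).mp hq
        simp [pvStep, hq, PySem.Set.add_of_mem this]
      · have hqf : d.contains q = false := by simpa using hq
        have : q ∉ d.keys := fun h => by
          simp [(PySem.Dict.contains_iff_mem_keys _ _).mpr h] at hqf
        rw [show pvStep d q = d.insert q (d.size : Int) by simp [pvStep, hqf]]
        rw [PySem.Dict.keys_insert_of_not_contains _ _ hqf, PySem.Set.add_of_not_mem this]
    rw [hkeys]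
    rfl
-- A key already present keeps its value through the rest of the scan.
lemma pvLookup_preserved (ps : List (String × String)) :
    ∀ (d : PySem.Dict (String × String) Int) (p : String × String),
      d.contains p = true → (ps.foldl pvStep d).getD p 0 = d.getD p 0 := by
  induction ps with
  | nil => intro d p _; rfl
  | cons q rest ih =>
    intro d p hp
    simp only [List.foldl_cons]
    by_cases hq : d.contains q = true
    · rw [show pvStep d q = d by simp [pvStep, hq]]
      exact ih d p hp
    · have hqf : d.contains q = false := by simpa using hq
      have hne : p ≠ q := fun h => by rw [h] at hp; simp [hp] at hqf
      rw [show pvStep d q = d.insert q (d.size : Int) by simp [pvStep, hqf]]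
      rw [ih _ p (by simp [PySem.Dict.contains_insert, hp])]
      rw [PySem.Dict.getD_insert]
      simp [hne]

-- A's loop, started at dict d with counter d.size, appends the lookups of the
-- remaining pairs in the dict obtained by scanning them all.
lemma pvLoop_eq (ps : List (String × String)) :
    ∀ (acc : List Int) (d : PySem.Dict (String × String) Int),
      prosodiaLoop ps acc d (d.size : Int)
        = acc ++ ps.map (fun p => (ps.foldl pvStep d).getD p 0) := by
  induction ps with
  | nil => intro acc d; simp [prosodiaLoop]
  | cons p rest ih =>
    intro acc d
    simp only [List.foldl_cons, List.map_cons]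
    by_cases hp : d.contains p = true
    · have hstep : pvStep d p = d := by simp [pvStep, hp]
      rw [hstep]
      simp only [prosodiaLoop, hp, if_true]
      rw [ih (acc ++ [d.getD p 0]) d, pvLookup_preserved rest d p hp]
      simp
    · have hpf : d.contains p = false := by simpa using hp
      have hstep : pvStep d p = d.insert p (d.size : Int) := by simp [pvStep, hpf]
      rw [hstep]
      simp only [prosodiaLoop, hpf, Bool.false_eq_true, if_false]
      have hsz : ((d.insert p (d.size : Int)).size : Int) = (d.size : Int) + 1 := by
        rw [PySem.Dict.size_insert]
        simp [hpf]
      rw [← hsz, ih (acc ++ [(d.size : Int)]) (d.insert p (d.size : Int))]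
      have hhead :
          (rest.foldl pvStep (d.insert p (d.size : Int))).getD p 0 = (d.size : Int) := by
        rw [pvLookup_preserved rest _ p (by simp [PySem.Dict.contains_insert_self])]
        exact PySem.Dict.getD_insert_self _ _ _ _
      rw [hhead]
      simp

-- Scanning L from the empty dict records exactly the distinct pairs of L as keys.
lemma pvKeys_ofList (L : List (String × String)) :
    (L.foldl pvStep PySem.Dict.empty).keys = PySem.Set.ofList L := by
  rw [pvKeys_foldl L PySem.Dict.empty]
  simp [PySem.Dict.keys_empty, PySem.Set.update, PySem.Set.ofList_eq_foldl]

lemma pvContains_iff (L : List (String × String)) (p : String × String) :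
    (L.foldl pvStep PySem.Dict.empty).contains p = true ↔ p ∈ L := by
  rw [PySem.Dict.contains_iff_mem_keys, pvKeys_ofList, PySem.Set.mem_ofList]

lemma pvSize_eq (L : List (String × String)) :
    (L.foldl pvStep PySem.Dict.empty).size = (PySem.Set.ofList L).length := by
  have : (L.foldl pvStep PySem.Dict.empty).size
      = (L.foldl pvStep PySem.Dict.empty).keys.length := by
    simp [PySem.Dict.size, PySem.Dict.keys]
  rw [this, pvKeys_ofList]

-- The bridge: A's dict value at a pair p of L is the number of distinct pairs
-- strictly before p's first occurrence in L.
lemma pvBridge (L : List (String × String)) (p : String × String) (hp : p ∈ L) :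
    (L.foldl pvStep PySem.Dict.empty).getD p 0
      = ((PySem.Set.ofList (L.take ((PySem.List.index? L p).getD 0))).length : Int) := by
  induction L using List.reverseRecOn with
  | nil => simp at hp
  | append_singleton L q ih =>
    rw [List.foldl_append, List.foldl_cons, List.foldl_nil]
    by_cases hpL : p ∈ L
    · have hidx : PySem.List.index? (L ++ [q]) p = PySem.List.index? L p :=
        PySem.List.index?_append_of_mem [q] hpL
      obtain ⟨k, hk⟩ := Option.isSome_iff_exists.mp ((PySem.List.index?_isSome_iff _ _).mpr hpL)
      obtain ⟨hklt, -, -⟩ := PySem.List.getElem_of_index?_eq_some hk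
      have htake : (L ++ [q]).take ((PySem.List.index? (L ++ [q]) p).getD 0)
          = L.take ((PySem.List.index? L p).getD 0) := by
        rw [hidx, hk]
        simp [List.take_append_of_le_length (le_of_lt hklt)]
      rw [htake, ← ih hpL]
      by_cases hq : (L.foldl pvStep PySem.Dict.empty).contains q = true
      · simp [pvStep, hq]
      · have hqf : (L.foldl pvStep PySem.Dict.empty).contains q = false := by simpa using hq
        have hqL : q ∉ L := fun h => by simp [(pvContains_iff L q).mpr h] at hqf
        have hne : p ≠ q := fun h => hqL (h ▸ hpL)
        rw [show pvStep (L.foldl pvStep PySem.Dict.empty) q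
            = (L.foldl pvStep PySem.Dict.empty).insert q
                ((L.foldl pvStep PySem.Dict.empty).size : Int) by simp [pvStep, hqf]]
        rw [PySem.Dict.getD_insert]
        simp [hne]
    · have hpq : p = q := by
        rcases List.mem_append.mp hp with h | h
        · exact absurd h hpL
        · simpa using h
      subst hpq
      have hqf : (L.foldl pvStep PySem.Dict.empty).contains p = false := by
        by_contra h
        exact hpL ((pvContains_iff L p).mp (by simpa using h))
      rw [show pvStep (L.foldl pvStep PySem.Dict.empty) p
          = (L.foldl pvStep PySem.Dict.empty).insert p
              ((L.foldl pvStep PySem.Dict.empty).size : Int) by simp [pvStep, hqf]]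
      rw [PySem.Dict.getD_insert_self]
      rw [PySem.List.index?_append_singleton_self L p hpL]
      simp [List.take_append_of_le_length (le_refl L.length), pvSize_eq]

-- ===== VERDICT (by name: the statement is the Claim_ definition above) =====
theorem prosodia_spec : Claim_equal_prosodia := by
  intro es finali _
  unfold Spec_prosodia prosodia prosodia_alt
  have h := pvLoop_eq (es.zip finali) [] PySem.Dict.empty
  rw [show ((PySem.Dict.empty : PySem.Dict (String × String) Int).size : Int) = 0 from rfl] at h
  rw [h]
  simp only [List.nil_append]
  refine List.map_congr_left (fun p hp => ?_)
  rw [pvBridge _ p hp]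
  obtain ⟨k, hk⟩ := Option.isSome_iff_exists.mp ((PySem.List.index?_isSome_iff _ _).mpr hp)
  rw [hk]
  simp [PySem.List.slice_to_natCast]
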